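-- pv_equiv track=rewrite | github.com/ParichayNITW/OPTIM2 | linefill_utils.py | generate_origin_combinations
-- ===== SOURCE A (Python) =====
-- def generate_origin_combinations(maxA: int = 2, maxB: int = 2) -> list[tuple[int, int]]:
--     """Return all feasible pump count combinations for the origin station."""
--     combos = [
--         (a, b)
--         for a in range(maxA + 1)
--         for b in range(maxB + 1)
--         if a + b > 0
--     ]
--     return sorted(combos, key=lambda x: (x[0] + x[1], x))
-- ===== SOURCE B (Python) =====
-- def generate_origin_combinations(maxA: int = 2, maxB: int = 2) -> list[tuple[int, int]]:
--     """Return all feasible pump count combinations for the origin station."""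
--     if maxA < 0 or maxB < 0:
--         return []
--     result = []
--     for s in range(1, maxA + maxB + 1):
--         for a in range(max(0, s - maxB), min(maxA, s) + 1):
--             result.append((a, s - a))
--     return result
-- ===== Notes on version B (the rewrite author's own statement) =====
-- stated objective: faster
-- what changed: B generates the pairs directly in output order by iterating over the total s and the feasible a-range for each s, instead of materialising the full grid and sorting it.
import Mathlib
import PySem

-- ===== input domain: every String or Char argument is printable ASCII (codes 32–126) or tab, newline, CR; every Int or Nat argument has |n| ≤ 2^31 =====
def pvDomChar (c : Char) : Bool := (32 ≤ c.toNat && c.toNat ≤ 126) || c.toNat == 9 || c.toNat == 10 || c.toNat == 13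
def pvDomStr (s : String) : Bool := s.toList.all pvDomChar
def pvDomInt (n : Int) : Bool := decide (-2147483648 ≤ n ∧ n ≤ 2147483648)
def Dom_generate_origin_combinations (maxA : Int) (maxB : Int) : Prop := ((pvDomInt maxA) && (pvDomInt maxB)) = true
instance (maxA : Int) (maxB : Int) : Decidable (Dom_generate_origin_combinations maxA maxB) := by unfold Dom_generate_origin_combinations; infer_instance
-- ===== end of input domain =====

-- B generates the pairs directly in output order (by total, then first component); no sort call.

-- ===== PORT A =====
-- Python's tiebreak key is the whole tuple x compared lexicographically; since the primary
-- key fixes x.1 + x.2, the lexicographic tiebreak on x is exactly a comparison of x.1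
-- (equal sums with equal first components are the same pair). Lean's Prod '<' is not
-- lexicographic, so the tiebreak is ported as 'fun x => x.1' — exact here.
def generate_origin_combinations (maxA : Int) (maxB : Int) : List (Int × Int) :=
  let combos := (PySem.List.pyRange 0 (maxA + 1)).flatMap (fun a =>
    ((PySem.List.pyRange 0 (maxB + 1)).filter (fun b => decide (0 < a + b))).map (fun b => (a, b)))
  PySem.List.sorted2 combos (fun x => x.1 + x.2) (fun x => x.1) false

-- ===== PORT B =====
def generate_origin_combinations_alt (maxA : Int) (maxB : Int) : List (Int × Int) :=
  if maxA < 0 ∨ maxB < 0 then []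
  else (PySem.List.pyRange 1 (maxA + maxB + 1)).foldl (fun acc s =>
    (PySem.List.pyRange (max 0 (s - maxB)) (min maxA s + 1)).foldl
      (fun acc2 a => acc2 ++ [(a, s - a)]) acc) []

-- ===== PRECONDITION & SPEC =====
def Spec_generate_origin_combinations (maxA : Int) (maxB : Int) (out : List (Int × Int)) : Prop := out = generate_origin_combinations_alt maxA maxB
instance (maxA : Int) (maxB : Int) (out : List (Int × Int)) : Decidable (Spec_generate_origin_combinations maxA maxB out) := by unfold Spec_generate_origin_combinations; infer_instance

-- ===== CLAIM (what is proved, stated in full; the proofs are below) =====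
def Claim_equal_generate_origin_combinations : Prop := ∀ (maxA : Int) (maxB : Int), Dom_generate_origin_combinations maxA maxB → Spec_generate_origin_combinations maxA maxB (generate_origin_combinations maxA maxB)

-- ===== LEMMAS AND PROOFS =====

-- The unsorted grid A builds, and the grouped-by-sum list B builds, as flatMaps.
def pvGridA (maxA maxB : Int) : List (Int × Int) :=
  (PySem.List.pyRange 0 (maxA + 1)).flatMap (fun a =>
    ((PySem.List.pyRange 0 (maxB + 1)).filter (fun b => decide (0 < a + b))).map (fun b => (a, b)))

def pvOutB (maxA maxB : Int) : List (Int × Int) :=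
  (PySem.List.pyRange 1 (maxA + maxB + 1)).flatMap (fun s =>
    (PySem.List.pyRange (max 0 (s - maxB)) (min maxA s + 1)).map (fun a => (a, s - a)))

-- The lexicographic key Python's sort uses, as a single linear-order key.
def pvKey (x : Int × Int) : Int ×ₗ Int := toLex (x.1 + x.2, x.1)

lemma pyRange_one_pairwise_lt (a b : Int) : (PySem.List.pyRange a b).Pairwise (· < ·) := by
  rw [PySem.List.pyRange_of_pos a b Int.one_pos]
  exact (List.pairwise_lt_range).map _ (fun h => by omega)

lemma alt_eq_pvOutB (maxA maxB : Int) :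
    generate_origin_combinations_alt maxA maxB = pvOutB maxA maxB := by
  unfold generate_origin_combinations_alt pvOutB
  split_ifs with hneg
  · symm
    rw [List.flatMap_eq_nil_iff]
    intro s hs
    rw [PySem.List.mem_pyRange_one] at hs
    rw [List.map_eq_nil_iff, List.eq_nil_iff_forall_not_mem]
    intro a ha
    rw [PySem.List.mem_pyRange_one] at ha
    omega
  rw [PySem.List.foldl_congr_mem _ _
        (fun acc s => acc ++ (PySem.List.pyRange (max 0 (s - maxB)) (min maxA s + 1)).map
          (fun a => (a, s - a))) _
        (fun acc s _ => PySem.List.foldl_append_singleton_eq_map _ _ _),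
      PySem.List.foldl_append_eq_flatMap]
  simp

lemma mem_pvGridA (maxA maxB : Int) (x : Int × Int) :
    x ∈ pvGridA maxA maxB ↔
      0 ≤ x.1 ∧ x.1 ≤ maxA ∧ 0 ≤ x.2 ∧ x.2 ≤ maxB ∧ 0 < x.1 + x.2 := by
  unfold pvGridA
  simp only [List.mem_flatMap, List.mem_map, List.mem_filter, PySem.List.mem_pyRange_one,
    decide_eq_true_eq]
  constructor
  · rintro ⟨a, ⟨ha0, ha1⟩, b, ⟨⟨hb0, hb1⟩, hab⟩, rfl⟩; simp; omega
  · rintro ⟨h1, h2, h3, h4, h5⟩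
    exact ⟨x.1, by omega, x.2, ⟨by omega, by omega⟩, rfl⟩

lemma mem_pvOutB (maxA maxB : Int) (x : Int × Int) :
    x ∈ pvOutB maxA maxB ↔
      0 ≤ x.1 ∧ x.1 ≤ maxA ∧ 0 ≤ x.2 ∧ x.2 ≤ maxB ∧ 0 < x.1 + x.2 := by
  unfold pvOutB
  simp only [List.mem_flatMap, List.mem_map, PySem.List.mem_pyRange_one]
  constructor
  · rintro ⟨s, ⟨hs0, hs1⟩, a, ⟨ha0, ha1⟩, rfl⟩; simp; omega
  · rintro ⟨h1, h2, h3, h4, h5⟩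
    exact ⟨x.1 + x.2, by omega, x.1, by omega, by simp⟩

lemma nodup_pvGridA (maxA maxB : Int) : (pvGridA maxA maxB).Nodup := by
  unfold pvGridA
  rw [List.nodup_flatMap]
  constructor
  · intro a _
    rw [List.Nodup, List.pairwise_map, List.pairwise_filter]
    refine (pyRange_one_pairwise_lt 0 (maxB + 1)).imp ?_
    intro b b' h _ _ heq
    exact absurd (congrArg Prod.snd heq) (by simp; omega)
  · refine (pyRange_one_pairwise_lt 0 (maxA + 1)).imp ?_
    intro a a' h x hx hx'
    simp only [List.mem_map, List.mem_filter] at hx hx'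
    obtain ⟨b, _, rfl⟩ := hx
    obtain ⟨b', _, heq⟩ := hx'
    exact absurd (congrArg Prod.fst heq.symm) (by simp; omega)

lemma nodup_pvOutB (maxA maxB : Int) : (pvOutB maxA maxB).Nodup := by
  unfold pvOutB
  rw [List.nodup_flatMap]
  constructor
  · intro s _
    rw [List.Nodup, List.pairwise_map]
    refine (pyRange_one_pairwise_lt _ _).imp ?_
    intro a a' h heq
    exact absurd (congrArg Prod.fst heq) (by simp; omega)
  · refine (pyRange_one_pairwise_lt 1 (maxA + maxB + 1)).imp ?_
    intro s s' h x hx hx'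
    simp only [List.mem_map] at hx hx'
    obtain ⟨a, _, rfl⟩ := hx
    obtain ⟨a', _, heq⟩ := hx'
    have := congrArg (fun p => p.1 + p.2) heq.symm
    simp at this; omega

lemma pairwise_key_pvOutB (maxA maxB : Int) :
    (pvOutB maxA maxB).Pairwise (fun x y => pvKey x < pvKey y) := by
  unfold pvOutB
  rw [List.pairwise_flatMap]
  constructor
  · intro s _
    rw [List.pairwise_map]
    refine (pyRange_one_pairwise_lt _ _).imp ?_
    intro a a' h
    refine Prod.Lex.toLex_lt_toLex.2 (Or.inr ⟨by simp, by simpa using h⟩)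
  · refine (pyRange_one_pairwise_lt 1 (maxA + maxB + 1)).imp ?_
    intro s s' h x hx y hy
    simp only [List.mem_map] at hx hy
    obtain ⟨a, _, rfl⟩ := hx
    obtain ⟨a', _, rfl⟩ := hy
    exact Prod.Lex.toLex_lt_toLex.2 (Or.inl (by simp; omega))

lemma perm_pvOutB_pvGridA (maxA maxB : Int) :
    (pvOutB maxA maxB).Perm (pvGridA maxA maxB) := by
  rw [List.perm_ext_iff_of_nodup (nodup_pvOutB maxA maxB) (nodup_pvGridA maxA maxB)]
  intro x
  rw [mem_pvOutB, mem_pvGridA]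

-- sorted2 with keys (sum, fst) is sorted with the single lex key pvKey.
lemma sorted2_eq_sorted_pvKey (xs : List (Int × Int)) :
    PySem.List.sorted2 xs (fun x => x.1 + x.2) (fun x => x.1) false
      = PySem.List.sorted xs pvKey false := by
  rw [PySem.List.sorted_eq_foldl_insertBy]
  unfold PySem.List.sorted2
  simp only [if_neg (by simp : ¬ (false = true))]
  congr 1
  funext acc x
  congr 1
  funext a b
  rw [show decide (pvKey a < pvKey b)
        = decide (a.1 + a.2 < b.1 + b.2 ∨ (a.1 + a.2 = b.1 + b.2 ∧ a.1 < b.1)) from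
      decide_eq_decide.2 (by simpa [pvKey] using
        (Prod.Lex.toLex_lt_toLex (x := (a.1 + a.2, a.1)) (y := (b.1 + b.2, b.1))))]
  by_cases h1 : a.1 + a.2 < b.1 + b.2 <;> by_cases h2 : b.1 + b.2 < a.1 + a.2 <;>
    by_cases h3 : a.1 < b.1 <;> simp [h1, h2, h3] <;> omega

-- ===== VERDICT (by name: the statement is the Claim_ definition above) =====
theorem generate_origin_combinations_spec : Claim_equal_generate_origin_combinations := by
  intro maxA maxB _
  show generate_origin_combinations maxA maxB = generate_origin_combinations_alt maxA maxB
  unfold generate_origin_combinations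
  rw [alt_eq_pvOutB]
  show PySem.List.sorted2 (pvGridA maxA maxB) _ _ false = _
  rw [sorted2_eq_sorted_pvKey]
  exact PySem.List.sorted_eq_of_perm_of_pairwise_lt _ _ _ (perm_pvOutB_pvGridA maxA maxB)
    (pairwise_key_pvOutB maxA maxB)
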